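-- pv_equiv track=rewrite | github.com/twillis1993/algorithmsAndDataStructures | arraySearchAndSort/timsort/timsort.py | getRunStack
-- ===== SOURCE A (Python) =====
-- def getRunStack(lst):
-- 	"""
-- 	Identifies all runs of descending elements.
--
-- 	Parameters
-- 	----------
-- 	lst : list
-- 		List to sort.
--
-- 	Returns
-- 	-------
-- 	List.
-- 	"""
-- 	runStack = []
--
-- 	i = 0
--
-- 	while i < len(lst)-1:
-- 		# Descending
-- 		if lst[i] > lst[i+1]:
-- 			j = i+1
-- 			while j < len(lst)-1 and lst[j] > lst[j+1]:
-- 				j += 1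
--
-- 			runStack.append((i,j))
--
-- 			i = j+1
-- 		else:
-- 			i += 1
--
-- 	return runStack
-- ===== SOURCE B (Python) =====
-- def getRunStack(lst):
--     """Flat single pass: track the start of the current descending run."""
--     runs = []
--     runStart = None
--     for i in range(len(lst) - 1):
--         if lst[i] > lst[i + 1]:
--             if runStart is None:
--                 runStart = i
--         else:
--             if runStart is not None:
--                 runs.append((runStart, i))
--                 runStart = None
--     if runStart is not None:
--         runs.append((runStart, len(lst) - 1))
--     return runs
-- ===== Notes on version B (the rewrite author's own statement) =====
-- stated objective: simpler
-- what changed: Replaced A's nested while loops (outer scan + inner run-extension scan with index jumps) by one flat for-loop over adjacent pairs that maintains a runStart state variable and emits a pair when a descending run ends.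
import Mathlib
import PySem

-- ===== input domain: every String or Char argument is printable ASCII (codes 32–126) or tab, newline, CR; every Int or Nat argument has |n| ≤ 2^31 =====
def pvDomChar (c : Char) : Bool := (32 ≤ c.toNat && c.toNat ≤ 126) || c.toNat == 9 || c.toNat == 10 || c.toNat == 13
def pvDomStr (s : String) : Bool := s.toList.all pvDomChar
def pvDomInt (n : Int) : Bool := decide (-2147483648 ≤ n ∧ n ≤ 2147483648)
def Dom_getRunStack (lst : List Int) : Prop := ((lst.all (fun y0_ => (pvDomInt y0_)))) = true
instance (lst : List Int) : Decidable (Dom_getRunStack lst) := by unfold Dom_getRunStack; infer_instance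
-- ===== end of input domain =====

-- B replaces A's nested while loops by one flat pass tracking the start of the
-- current descending run (objective: simpler).

-- ===== PORT A =====
-- inner while loop: while j < len(lst)-1 and lst[j] > lst[j+1]: j += 1
def gsrInner (lst : List Int) (j : Nat) : Nat :=
  if j < lst.length - 1 ∧ lst.getD j 0 > lst.getD (j+1) 0 then
    gsrInner lst (j+1)
  else j
termination_by lst.length - 1 - j
decreasing_by omega

theorem gsrInner_ge (lst : List Int) (j : Nat) : j ≤ gsrInner lst j := by
  fun_induction gsrInner lst j with
  | case1 j h ih => omega
  | case2 j h => exact Nat.le_refl j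

-- outer while loop of A, with the accumulating runStack
def gsrOuter (lst : List Int) (i : Nat) (acc : List (Int × Int)) : List (Int × Int) :=
  if h : i < lst.length - 1 then
    if lst.getD i 0 > lst.getD (i+1) 0 then
      let j := gsrInner lst (i+1)
      gsrOuter lst (j+1) (acc ++ [((i : Int), (j : Int))])
    else
      gsrOuter lst (i+1) acc
  else acc
termination_by lst.length - 1 - i
decreasing_by
  · have := gsrInner_ge lst (i+1); omega
  · omega

def getRunStack (lst : List Int) : List (Int × Int) := gsrOuter lst 0 []

-- ===== PORT B =====
-- one step of the flat for-loop over i in range(len(lst)-1)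
def gsrStep (lst : List Int) (st : List (Int × Int) × Option Nat) (i : Nat) :
    List (Int × Int) × Option Nat :=
  if lst.getD i 0 > lst.getD (i+1) 0 then
    (st.1, match st.2 with
           | none => some i
           | some r => some r)
  else
    match st.2 with
    | some r => (st.1 ++ [((r : Int), (i : Int))], none)
    | none => (st.1, none)

def getRunStack_alt (lst : List Int) : List (Int × Int) :=
  let st := (List.range (lst.length - 1)).foldl (gsrStep lst) ([], none)
  match st.2 with
  | some r => st.1 ++ [((r : Int), ((lst.length : Int) - 1))]
  | none => st.1

-- ===== PRECONDITION & SPEC =====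
def Spec_getRunStack (lst : List Int) (out : List (Int × Int)) : Prop := out = getRunStack_alt lst
instance (lst : List Int) (out : List (Int × Int)) : Decidable (Spec_getRunStack lst out) := by unfold Spec_getRunStack; infer_instance

-- ===== CLAIM (what is proved, stated in full; the proofs are below) =====
def Claim_equal_getRunStack : Prop := ∀ (lst : List Int), Dom_getRunStack lst → Spec_getRunStack lst (getRunStack lst)

-- ===== LEMMAS AND PROOFS =====

-- every index passed over by the inner loop is a strict descent
theorem gsrInner_desc (lst : List Int) (j : Nat) :
    ∀ k, j ≤ k → k < gsrInner lst j → lst.getD k 0 > lst.getD (k+1) 0 := by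
  fun_induction gsrInner lst j with
  | case1 j h ih =>
      intro k hk1 hk2
      rcases Nat.eq_or_lt_of_le hk1 with rfl | hlt
      · exact h.2
      · exact ih k hlt hk2
  | case2 j h =>
      intro k hk1 hk2; omega

theorem gsrInner_le (lst : List Int) (j : Nat) (hj : j ≤ lst.length - 1) :
    gsrInner lst j ≤ lst.length - 1 := by
  fun_induction gsrInner lst j with
  | case1 j h ih => exact ih (by omega)
  | case2 j h => exact hj

theorem gsrInner_stop (lst : List Int) (j : Nat)
    (h : gsrInner lst j < lst.length - 1) :
    ¬ lst.getD (gsrInner lst j) 0 > lst.getD (gsrInner lst j + 1) 0 := by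
  fun_induction gsrInner lst j with
  | case1 j hc ih => exact ih h
  | case2 j hc =>
      intro hd
      exact hc ⟨h, hd⟩

-- the flat fold passes unchanged over a stretch of strict descents
theorem fold_desc_stretch (lst : List Int) (acc : List (Int × Int)) (r : Nat) :
    ∀ (c m : Nat), (∀ k, m ≤ k → k < m + c → lst.getD k 0 > lst.getD (k+1) 0) →
    (List.range' m c).foldl (gsrStep lst) (acc, some r) = (acc, some r) := by
  intro c
  induction c with
  | zero => intro m _; simp
  | succ c ih =>
      intro m hd
      rw [List.range'_succ, List.foldl_cons]
      have hm : lst.getD m 0 > lst.getD (m+1) 0 := hd m (Nat.le_refl m) (by omega)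
      have : gsrStep lst (acc, some r) m = (acc, some r) := by
        unfold gsrStep; rw [if_pos hm]
      rw [this]
      exact ih (m+1) (fun k hk1 hk2 => hd k (by omega) (by omega))

-- finishing step of B applied to a fold state
def gsrFinish (lst : List Int) (st : List (Int × Int) × Option Nat) : List (Int × Int) :=
  match st.2 with
  | some r => st.1 ++ [((r : Int), ((lst.length : Int) - 1))]
  | none => st.1

-- main simulation: from any position i, B's remaining flat fold (started with no
-- open run) finishes to the same list as A's outer loop
theorem gsr_sim (lst : List Int) :
    ∀ (cnt i : Nat) (acc : List (Int × Int)), i + cnt = lst.length - 1 →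
    gsrFinish lst ((List.range' i cnt).foldl (gsrStep lst) (acc, none)) =
      gsrOuter lst i acc := by
  intro cnt
  induction cnt using Nat.strong_induction_on with
  | _ cnt ih =>
    intro i acc hcnt
    match cnt, hcnt with
    | 0, hcnt =>
        rw [gsrOuter, dif_neg (by omega)]
        rfl
    | (c+1), hcnt =>
        have hi : i < lst.length - 1 := by omega
        rw [gsrOuter]
        rw [dif_pos hi]
        by_cases hd : lst.getD i 0 > lst.getD (i+1) 0
        · rw [if_pos hd]
          set j := gsrInner lst (i+1) with hj
          have hji : i + 1 ≤ j := gsrInner_ge lst (i+1)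
          have hjle : j ≤ lst.length - 1 := gsrInner_le lst (i+1) (by omega)
          -- split the range: first i, then the descending stretch (i+1..j-1), then the rest
          have hsplit : List.range' i (c+1) =
              i :: (List.range' (i+1) (j - (i+1)) ++ List.range' j (lst.length - 1 - j)) := by
            rw [List.range'_succ]
            congr 1
            have h1 : List.range' (i+1) (j - (i+1)) ++ List.range' ((i+1) + (j - (i+1))) (lst.length - 1 - j)
                = List.range' (i+1) ((j - (i+1)) + (lst.length - 1 - j)) := List.range'_append_1
            have h2 : (i+1) + (j - (i+1)) = j := by omega
            have h3 : (j - (i+1)) + (lst.length - 1 - j) = c := by omega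
            rw [h2, h3] at h1
            exact h1.symm
          rw [hsplit, List.foldl_cons]
          have hstep : gsrStep lst (acc, none) i = (acc, some i) := by
            unfold gsrStep; rw [if_pos hd]
          rw [hstep, List.foldl_append]
          have hstretch : (List.range' (i+1) (j - (i+1))).foldl (gsrStep lst) (acc, some i)
              = (acc, some i) := by
            apply fold_desc_stretch
            intro k hk1 hk2
            exact gsrInner_desc lst (i+1) k hk1 (by omega)
          rw [hstretch]
          rcases Nat.eq_or_lt_of_le hjle with hje | hjlt
          · -- j = lst.length - 1 : fold over empty rest, finish emits (i, j)
            have h0 : lst.length - 1 - j = 0 := by omega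
            rw [h0]
            rw [gsrOuter, dif_neg (by omega)]
            show acc ++ [((i : Int), ((lst.length : Int) - 1))] = acc ++ [((i : Int), (j : Int))]
            have hcast : ((lst.length : Int) - 1) = (j : Int) := by omega
            rw [hcast]
          · -- j < lst.length - 1 : pair at j is not descending, emit and continue
            have hjd : ¬ lst.getD j 0 > lst.getD (j+1) 0 := gsrInner_stop lst (i+1) hjlt
            have hrest : lst.length - 1 - j = (lst.length - 1 - j - 1) + 1 := by omega
            rw [hrest, List.range'_succ, List.foldl_cons]
            have hstep2 : gsrStep lst (acc, some i) j = (acc ++ [((i : Int), (j : Int))], none) := by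
              unfold gsrStep; rw [if_neg hjd]
            rw [hstep2]
            exact ih (lst.length - 1 - j - 1) (by omega) (j+1)
              (acc ++ [((i : Int), (j : Int))]) (by omega)
        · rw [if_neg hd]
          rw [List.range'_succ, List.foldl_cons]
          have hstep : gsrStep lst (acc, none) i = (acc, none) := by
            unfold gsrStep; rw [if_neg hd]
          rw [hstep]
          exact ih c (by omega) (i+1) acc (by omega)

-- ===== VERDICT (by name: the statement is the Claim_ definition above) =====
theorem getRunStack_spec : Claim_equal_getRunStack := by
  intro lst _
  unfold Spec_getRunStack getRunStack getRunStack_alt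
  rw [← gsr_sim lst (lst.length - 1) 0 [] (by omega)]
  rw [List.range_eq_range']
  rfl
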